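-- pv_equiv track=rewrite | github.com/lorantszabo98/Text_extraction_with_Tesseract_OCR | Text_extraction_with_gui.py | read_consecutive_numbers_from_index
-- ===== SOURCE A (Python) =====
-- def read_consecutive_numbers_from_index(text, start_index):
--     if start_index < 0 or start_index >= len(text):
--         return None
--     first_digit_index = -1
--     for i in range(start_index, len(text)):
--         if text[i].isdigit():
--             first_digit_index = i
--             break
--     if first_digit_index == -1:
--         return None
--     consecutive_numbers = ""
--     for char in text[first_digit_index:]:
--         if char.isdigit():
--             consecutive_numbers += char
--         else:
--             break
--     return consecutive_numbers
-- ===== SOURCE B (Python) =====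
-- def read_consecutive_numbers_from_index(text, start_index):
--     if start_index < 0 or start_index >= len(text):
--         return None
--     # Stage 1: segment the whole text into maximal digit runs [lo, hi).
--     runs = []
--     lo = None
--     for i, ch in enumerate(text):
--         if ch.isdigit():
--             if lo is None:
--                 lo = i
--         elif lo is not None:
--             runs.append((lo, i))
--             lo = None
--     if lo is not None:
--         runs.append((lo, len(text)))
--     # Stage 2: the answer is the part at/after start_index of the first run ending after it.
--     for a, b in runs:
--         if b > start_index:
--             return text[max(a, start_index):b]
--     return None
-- ===== Notes on version B (the rewrite author's own statement) =====
-- stated objective: alternative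
-- what changed: Instead of scanning forward from start_index (find first digit, then accumulate), B segments the whole text once into a list of maximal digit-run intervals and then answers by interval query: the first run ending after start_index, sliced from max(run start, start_index).
import Mathlib
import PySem

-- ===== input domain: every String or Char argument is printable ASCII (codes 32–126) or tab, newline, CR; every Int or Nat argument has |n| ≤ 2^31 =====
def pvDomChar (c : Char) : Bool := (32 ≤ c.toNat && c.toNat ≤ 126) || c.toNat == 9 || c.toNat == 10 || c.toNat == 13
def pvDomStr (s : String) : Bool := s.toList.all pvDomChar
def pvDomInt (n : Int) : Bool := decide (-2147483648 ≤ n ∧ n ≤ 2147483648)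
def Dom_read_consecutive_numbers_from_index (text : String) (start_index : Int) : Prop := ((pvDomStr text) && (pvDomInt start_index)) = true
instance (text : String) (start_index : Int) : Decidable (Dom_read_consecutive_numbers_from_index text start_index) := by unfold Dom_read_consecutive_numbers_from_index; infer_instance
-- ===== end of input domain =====

-- B replaces A's scan-from-start_index (find first digit, then accumulate the run) by a
-- two-stage algorithm: segment the WHOLE text once into maximal digit-run intervals, then
-- answer by interval query (first run ending after start_index, sliced from
-- max(run start, start_index)). Same O(n) cost; return values proved equal on the domain.

-- ===== PORT A =====
-- first loop: 'for i in range(start_index, len(text)): if text[i].isdigit(): ... break'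
-- — consecutive indexing text[i] for i = start_index, start_index+1, … is walking the
-- suffix text[start_index:] while carrying the absolute index i (exact: indices in range).
def pvFindLoop : List Char → Int → Int
  | [], _ => -1
  | c :: rest, i => if PySem.Chars.isdigit c then i else pvFindLoop rest (i + 1)

-- second loop: 'for char in text[first_digit_index:]: if char.isdigit(): consecutive += char else: break'
-- — the string accumulator is carried as its char list (string = list of chars under the convention).
def pvTakeLoop : List Char → List Char → List Char
  | [], acc => acc
  | c :: rest, acc => if PySem.Chars.isdigit c then pvTakeLoop rest (acc ++ [c]) else acc

def read_consecutive_numbers_from_index (text : String) (start_index : Int) : Option String :=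
  let cs := text.toList
  if start_index < 0 ∨ start_index ≥ (cs.length : Int) then none
  else
    let first_digit_index := pvFindLoop (cs.drop start_index.toNat) start_index
    if first_digit_index = -1 then none
    else some (String.ofList (pvTakeLoop (PySem.List.slice cs (some first_digit_index) none) []))

-- ===== PORT B =====
-- stage-1 loop: 'for i, ch in enumerate(text): …' carrying (runs, lo); the enumerate
-- counter is carried as the Int argument i (exact: i = 0, 1, … in order).
def pvRunsLoop : List Char → Int → Option Int → List (Int × Int) → List (Int × Int) × Option Int
  | [], _, lo, runs => (runs, lo)
  | ch :: rest, i, lo, runs =>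
    if PySem.Chars.isdigit ch then
      pvRunsLoop rest (i + 1) (match lo with | none => some i | some a => some a) runs
    else
      match lo with
      | some a => pvRunsLoop rest (i + 1) none (runs ++ [(a, i)])
      | none => pvRunsLoop rest (i + 1) none runs

-- post-loop 'if lo is not None: runs.append((lo, len(text)))'
def pvClose (st : List (Int × Int) × Option Int) (n : Int) : List (Int × Int) :=
  match st.2 with
  | some a => st.1 ++ [(a, n)]
  | none => st.1

-- stage-2 loop: 'for a, b in runs: if b > start_index: return text[max(a, start_index):b]'
def pvSelectLoop (cs : List Char) (start_index : Int) : List (Int × Int) → Option String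
  | [] => none
  | (a, b) :: rest =>
    if b > start_index then some (String.ofList (PySem.List.slice cs (some (max a start_index)) (some b)))
    else pvSelectLoop cs start_index rest

def read_consecutive_numbers_from_index_alt (text : String) (start_index : Int) : Option String :=
  let cs := text.toList
  if start_index < 0 ∨ start_index ≥ (cs.length : Int) then none
  else
    let runs := pvClose (pvRunsLoop cs 0 none []) (cs.length : Int)
    pvSelectLoop cs start_index runs

-- ===== PRECONDITION & SPEC =====
def Spec_read_consecutive_numbers_from_index (text : String) (start_index : Int) (out : Option String) : Prop := out = read_consecutive_numbers_from_index_alt text start_index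
instance (text : String) (start_index : Int) (out : Option String) : Decidable (Spec_read_consecutive_numbers_from_index text start_index out) := by unfold Spec_read_consecutive_numbers_from_index; infer_instance

-- ===== CLAIM (what is proved, stated in full; the proofs are below) =====
def Claim_equal_read_consecutive_numbers_from_index : Prop := ∀ (text : String) (start_index : Int), Dom_read_consecutive_numbers_from_index text start_index → Spec_read_consecutive_numbers_from_index text start_index (read_consecutive_numbers_from_index text start_index)

-- ===== LEMMAS AND PROOFS =====

-- Both programs, guard aside, compute this value: the digit run at/after position s.
def pvTarget (cs : List Char) (s : Int) : Option String :=
  let run := ((cs.drop s.toNat).dropWhile (fun c => !PySem.Chars.isdigit c)).takeWhile (fun c => PySem.Chars.isdigit c)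
  if run.isEmpty then none else some (String.ofList run)

-- ---- A-side lemmas ----

-- A's first loop, characterised by dropWhile on the suffix it walks.
theorem pvFindLoop_spec (l : List Char) (i : Int) :
    (pvFindLoop l i = -1 ∧ l.dropWhile (fun c => !PySem.Chars.isdigit c) = []) ∨
    (∃ k : Nat, pvFindLoop l i = i + k ∧
      l.dropWhile (fun c => !PySem.Chars.isdigit c) = l.drop k ∧
      ∃ c rest, l.drop k = c :: rest ∧ PySem.Chars.isdigit c = true) := by
  induction l generalizing i with
  | nil => exact Or.inl ⟨rfl, rfl⟩
  | cons c rest ih =>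
    by_cases hd : PySem.Chars.isdigit c
    · refine Or.inr ⟨0, ?_, ?_, c, rest, rfl, hd⟩
      · simp [pvFindLoop, hd]
      · simp [List.dropWhile, hd]
    · rcases ih (i + 1) with ⟨h1, h2⟩ | ⟨k, h1, h2, cc, rr, h3, h4⟩
      · exact Or.inl ⟨by simp [pvFindLoop, hd, h1], by simp [List.dropWhile, hd, h2]⟩
      · refine Or.inr ⟨k + 1, ?_, ?_, cc, rr, ?_, h4⟩
        · simp [pvFindLoop, hd, h1]; ring
        · simpa [List.dropWhile, hd] using h2
        · simpa using h3

theorem pvTakeLoop_spec (l acc : List Char) :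
    pvTakeLoop l acc = acc ++ l.takeWhile (fun c => PySem.Chars.isdigit c) := by
  induction l generalizing acc with
  | nil => simp [pvTakeLoop]
  | cons c rest ih =>
    by_cases hd : PySem.Chars.isdigit c
    · simp [pvTakeLoop, hd, ih]
    · simp [pvTakeLoop, List.takeWhile, hd]

-- A, inside the guard, computes pvTarget.
theorem pvA_eq_target (cs : List Char) (s : Int) (h0 : 0 ≤ s) (_h1 : s < (cs.length : Int)) :
    (let first_digit_index := pvFindLoop (cs.drop s.toNat) s
     if first_digit_index = -1 then none
     else some (String.ofList (pvTakeLoop (PySem.List.slice cs (some first_digit_index) none) []))) =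
    pvTarget cs s := by
  rcases pvFindLoop_spec (cs.drop s.toNat) s with ⟨hf, hd⟩ | ⟨k, hf, hd, c, rest, hk, hdig⟩
  · simp [hf, pvTarget, hd]
  · have hne : s + (k : Int) ≠ -1 := by omega
    have hdrop : cs.drop (s + (k : Int)).toNat = (cs.drop s.toNat).drop k := by
      rw [List.drop_drop]; congr 1; omega
    simp only [hf]
    rw [if_neg hne, PySem.List.slice_from _ (by omega), hdrop, ← hd, pvTakeLoop_spec]
    unfold pvTarget
    rw [hd, hk]
    simp [List.takeWhile, hdig]

-- ---- B-side lemmas ----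

-- pvRunsLoop only appends to its accumulator.
theorem pvRunsLoop_acc (tail : List Char) (i : Int) (lo : Option Int)
    (r1 r2 : List (Int × Int)) :
    pvRunsLoop tail i lo (r1 ++ r2) =
      (r1 ++ (pvRunsLoop tail i lo r2).1, (pvRunsLoop tail i lo r2).2) := by
  induction tail generalizing i lo r2 with
  | nil => simp [pvRunsLoop]
  | cons ch rest ih =>
    by_cases hd : PySem.Chars.isdigit ch
    · simp only [pvRunsLoop, hd, if_pos]
      exact ih _ _ _
    · cases lo with
      | none => simp only [pvRunsLoop, hd, if_neg, Bool.false_eq_true, not_false_iff]; exact ih _ _ _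
      | some a =>
        simp only [pvRunsLoop, hd, if_neg, Bool.false_eq_true, not_false_iff]
        rw [List.append_assoc]
        exact ih _ _ _

-- runs ending at or before start_index are skipped by the selection loop.
theorem pvSelect_skip (cs : List Char) (s : Int) (runs l : List (Int × Int))
    (h : ∀ p ∈ runs, p.2 ≤ s) :
    pvSelectLoop cs s (runs ++ l) = pvSelectLoop cs s l := by
  induction runs with
  | nil => rfl
  | cons p rest ih =>
    obtain ⟨a, b⟩ := p
    have hb : b ≤ s := h (a, b) List.mem_cons_self
    simp only [List.cons_append, pvSelectLoop, if_neg (by omega : ¬ b > s)]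
    exact ih (fun q hq => h q (List.mem_cons_of_mem _ hq))

-- loop invariant for stage 1 relative to the fixed query position s
def pvLoInv (cs : List Char) (s i : Int) : Option Int → Prop
  | none => s < i → (((cs.drop s.toNat).take (i - s).toNat).all (fun c => !PySem.Chars.isdigit c)) = true
  | some a => 0 ≤ a ∧ a < i ∧
      (((cs.drop (max a s).toNat).take (i - max a s).toNat).all (fun c => PySem.Chars.isdigit c)) = true ∧
      (max a s < i → (cs.drop s.toNat).dropWhile (fun c => !PySem.Chars.isdigit c) = cs.drop (max a s).toNat)

-- one character at index i extends a take-window ending at i by one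
theorem pvTakeExt (cs : List Char) (ch : Char) (m i : Int) (h0 : 0 ≤ m) (hmi : m ≤ i)
    (hch : cs[i.toNat]? = some ch) :
    (cs.drop m.toNat).take ((i + 1) - m).toNat = (cs.drop m.toNat).take (i - m).toNat ++ [ch] := by
  have h1 : ((i + 1) - m).toNat = (i - m).toNat + 1 := by omega
  rw [h1, List.take_add_one]
  have h2 : (cs.drop m.toNat)[(i - m).toNat]? = some ch := by
    rw [List.getElem?_drop]
    rw [show m.toNat + (i - m).toNat = i.toNat from by omega, hch]
  rw [h2]
  rfl

-- skipping an all-non-digit window does not change the dropWhile result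
theorem pvDropSkip (cs : List Char) (s i : Int) (h0 : 0 ≤ s) (hsi : s ≤ i)
    (hall : ((cs.drop s.toNat).take (i - s).toNat).all (fun c => !PySem.Chars.isdigit c) = true) :
    (cs.drop s.toNat).dropWhile (fun c => !PySem.Chars.isdigit c)
      = (cs.drop i.toNat).dropWhile (fun c => !PySem.Chars.isdigit c) := by
  have hsplit : cs.drop s.toNat
      = (cs.drop s.toNat).take (i - s).toNat ++ cs.drop i.toNat := by
    conv_lhs => rw [← List.take_append_drop (i - s).toNat (cs.drop s.toNat)]
    congr 1
    rw [List.drop_drop]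
    congr 1
    omega
  nth_rewrite 1 [hsplit]
  exact List.dropWhile_append_of_pos (by simpa using hall)

-- an all-digit window followed by a non-digit (or the end) is exactly the takeWhile
theorem pvTakeRun (cs : List Char) (m i : Int) (h0 : 0 ≤ m) (hmi : m ≤ i)
    (hall : ((cs.drop m.toNat).take (i - m).toNat).all (fun c => PySem.Chars.isdigit c) = true)
    (hstop : (cs.drop i.toNat).takeWhile (fun c => PySem.Chars.isdigit c) = []) :
    (cs.drop m.toNat).takeWhile (fun c => PySem.Chars.isdigit c)
      = (cs.drop m.toNat).take (i - m).toNat := by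
  have hsplit : cs.drop m.toNat
      = (cs.drop m.toNat).take (i - m).toNat ++ cs.drop i.toNat := by
    conv_lhs => rw [← List.take_append_drop (i - m).toNat (cs.drop m.toNat)]
    congr 1
    rw [List.drop_drop]
    congr 1
    omega
  nth_rewrite 1 [hsplit]
  rw [List.takeWhile_append_of_pos (by simpa using hall), hstop, List.append_nil]

theorem pvRuns_sel (cs : List Char) (s : Int) (hs0 : 0 ≤ s) (hs1 : s < (cs.length : Int)) :
    ∀ (tail : List Char) (i : Int) (lo : Option Int) (runs : List (Int × Int)),
      0 ≤ i → i ≤ (cs.length : Int) → tail = cs.drop i.toNat →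
      (∀ p ∈ runs, p.2 ≤ s) → pvLoInv cs s i lo →
      pvSelectLoop cs s (pvClose (pvRunsLoop tail i lo runs) (cs.length : Int)) = pvTarget cs s := by
  intro tail
  induction tail with
  | nil =>
    intro i lo runs hi0 hi2 htail hruns hinv
    have hlen : (cs.length : Int) ≤ i := by
      have := List.drop_eq_nil_iff.mp htail.symm
      omega
    cases lo with
    | none =>
      have hall := hinv (by omega)
      have htake : (cs.drop s.toNat).take (i - s).toNat = cs.drop s.toNat :=
        List.take_of_length_le (by simp [List.length_drop]; try omega)
      rw [htake] at hall
      have hdw : (cs.drop s.toNat).dropWhile (fun c => !PySem.Chars.isdigit c) = [] :=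
        List.dropWhile_eq_nil_iff.mpr (by simpa using hall)
      show pvSelectLoop cs s (pvClose (runs, none) _) = _
      rw [show pvClose (runs, none) (cs.length : Int) = runs ++ [] from by simp [pvClose]]
      rw [pvSelect_skip cs s runs [] hruns]
      simp [pvSelectLoop, pvTarget, hdw]
    | some a =>
      obtain ⟨ha0, hai, hdig, hdEq⟩ := hinv
      have hdw := hdEq (by omega)
      have htake : (cs.drop (max a s).toNat).take (i - max a s).toNat
          = cs.drop (max a s).toNat :=
        List.take_of_length_le (by simp [List.length_drop]; try omega)
      rw [htake] at hdig
      have htw : (cs.drop (max a s).toNat).takeWhile (fun c => PySem.Chars.isdigit c)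
          = cs.drop (max a s).toNat := List.takeWhile_eq_self_iff.mpr (by simpa using hdig)
      have hne : cs.drop (max a s).toNat ≠ [] := by
        intro h
        have := List.drop_eq_nil_iff.mp h
        omega
      show pvSelectLoop cs s (pvClose (runs, some a) _) = _
      rw [show pvClose (runs, some a) (cs.length : Int) = runs ++ [(a, (cs.length : Int))] from rfl]
      rw [pvSelect_skip cs s runs _ hruns]
      have hsel : pvSelectLoop cs s [(a, (cs.length : Int))]
          = some (String.ofList (PySem.List.slice cs (some (max a s)) (some (cs.length : Int)))) := by
        simp only [pvSelectLoop]
        rw [if_pos (by omega)]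
      have hslice : PySem.List.slice cs (some (max a s)) (some (cs.length : Int))
          = cs.drop (max a s).toNat := by
        rw [PySem.List.slice_toNat _ (by omega) (by omega)]
        exact List.take_of_length_le (by simp [List.length_drop]; try omega)
      rw [hsel, hslice]
      simp only [pvTarget]
      rw [hdw, htw]
      simp [hne]
  | cons ch rest ih =>
    intro i lo runs hi0 hi2 htail hruns hinv
    have hlen : i.toNat < cs.length := by
      by_contra h
      rw [List.drop_eq_nil_iff.mpr (by omega)] at htail
      simp at htail
    have hch : cs[i.toNat]? = some ch := by rw [← List.head?_drop, ← htail]; rfl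
    have hrest : rest = cs.drop (i + 1).toNat := by
      rw [show (i + 1).toNat = i.toNat + 1 from by omega, ← List.tail_drop, ← htail]
      rfl
    have hi1 : i + 1 ≤ (cs.length : Int) := by omega
    have hdropi : cs.drop i.toNat = ch :: rest := htail.symm
    by_cases hd : PySem.Chars.isdigit ch
    · cases lo with
      | none =>
        rw [show pvRunsLoop (ch :: rest) i none runs
            = pvRunsLoop rest (i + 1) (some i) runs from by simp [pvRunsLoop, hd]]
        apply ih (i + 1) (some i) runs (by omega) hi1 hrest hruns
        refine ⟨hi0, by omega, ?_, ?_⟩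
        · by_cases hsi : s ≤ i
          · rw [show max i s = i from by omega, show (i + 1 - i).toNat = 1 from by omega, hdropi]
            simp [hd]
          · rw [show max i s = s from by omega, show (i + 1 - s).toNat = 0 from by omega]
            simp
        · intro hlt
          have hm : max i s = i := by omega
          rw [hm]
          have hstep : (cs.drop i.toNat).dropWhile (fun c => !PySem.Chars.isdigit c)
              = cs.drop i.toNat := by
            rw [hdropi]
            simp [List.dropWhile, hd]
          by_cases hsi : s < i
          · rw [pvDropSkip cs s i hs0 (by omega) (hinv hsi)]
            exact hstep
          · rw [show s = i from by omega]
            exact hstep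
      | some a =>
        obtain ⟨ha0, hai, hdig, hdEq⟩ := hinv
        rw [show pvRunsLoop (ch :: rest) i (some a) runs
            = pvRunsLoop rest (i + 1) (some a) runs from by simp [pvRunsLoop, hd]]
        apply ih (i + 1) (some a) runs (by omega) hi1 hrest hruns
        refine ⟨ha0, by omega, ?_, ?_⟩
        · by_cases hmi : max a s ≤ i
          · rw [pvTakeExt cs ch (max a s) i (by omega) hmi hch]
            simp [List.all_append, hdig, hd]
          · rw [show (i + 1 - max a s).toNat = 0 from by omega]
            simp
        · intro hlt
          by_cases hmi : max a s < i
          · exact hdEq hmi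
          · have hse : s = i := by omega
            rw [show max a s = i from by omega, hse, hdropi]
            simp [List.dropWhile, hd]
    · cases lo with
      | none =>
        rw [show pvRunsLoop (ch :: rest) i none runs = pvRunsLoop rest (i + 1) none runs from by
          simp [pvRunsLoop, hd]]
        apply ih (i + 1) none runs (by omega) hi1 hrest hruns
        intro hs
        by_cases hsi : s < i
        · rw [pvTakeExt cs ch s i hs0 (by omega) hch]
          simp [List.all_append, hinv hsi, hd]
        · rw [show s = i from by omega, show (i + 1 - i).toNat = 1 from by omega, hdropi]
          simp [hd]
      | some a =>
        obtain ⟨ha0, hai, hdig, hdEq⟩ := hinv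
        rw [show pvRunsLoop (ch :: rest) i (some a) runs
            = pvRunsLoop rest (i + 1) none (runs ++ [(a, i)]) from by simp [pvRunsLoop, hd]]
        by_cases hmi : max a s < i
        · -- the run being closed is the answer: select it directly
          have hacc := pvRunsLoop_acc rest (i + 1) none (runs ++ [(a, i)]) []
          rw [List.append_nil] at hacc
          rw [hacc]
          rw [show pvClose ((runs ++ [(a, i)]) ++ (pvRunsLoop rest (i + 1) none []).1,
                (pvRunsLoop rest (i + 1) none []).2) (cs.length : Int)
              = (runs ++ [(a, i)]) ++ pvClose (pvRunsLoop rest (i + 1) none []) (cs.length : Int) from by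
            cases h2 : (pvRunsLoop rest (i + 1) none []).2 <;> simp [pvClose, h2]]
          rw [List.append_assoc, pvSelect_skip cs s runs _ hruns]
          have hsel : ∀ l, pvSelectLoop cs s ((a, i) :: l)
              = some (String.ofList (PySem.List.slice cs (some (max a s)) (some i))) := by
            intro l
            simp only [pvSelectLoop]
            rw [if_pos (by omega)]
          rw [show [(a, i)] ++ pvClose (pvRunsLoop rest (i + 1) none []) (cs.length : Int)
              = (a, i) :: pvClose (pvRunsLoop rest (i + 1) none []) (cs.length : Int) from rfl]
          rw [hsel]
          have hslice : PySem.List.slice cs (some (max a s)) (some i)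
              = (cs.drop (max a s).toNat).take (i - max a s).toNat := by
            rw [PySem.List.slice_toNat _ (by omega) (by omega)]
            congr 1
            omega
          have hstop : (cs.drop i.toNat).takeWhile (fun c => PySem.Chars.isdigit c) = [] := by
            rw [hdropi]
            simp [List.takeWhile, hd]
          have hrun : ((cs.drop s.toNat).dropWhile (fun c => !PySem.Chars.isdigit c)).takeWhile
              (fun c => PySem.Chars.isdigit c)
              = (cs.drop (max a s).toNat).take (i - max a s).toNat := by
            rw [hdEq hmi]
            exact pvTakeRun cs (max a s) i (by omega) (by omega) hdig hstop
          have hne : ((cs.drop (max a s).toNat).take (i - max a s).toNat).isEmpty = false := by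
            simp
            omega
          simp only [pvTarget]
          rw [hrun, hslice, hne]
          simp
        · -- the closed run ends at or before s: it joins the skipped accumulator
          apply ih (i + 1) none (runs ++ [(a, i)]) (by omega) hi1 hrest
          · intro p hp
            rcases List.mem_append.mp hp with h | h
            · exact hruns p h
            · have : p = (a, i) := by simpa using h
              rw [this]
              show i ≤ s
              omega
          · intro hs
            rw [show s = i from by omega, show (i + 1 - i).toNat = 1 from by omega, hdropi]
            simp [hd]

-- ===== VERDICT (by name: the statement is the Claim_ definition above) =====
theorem read_consecutive_numbers_from_index_spec : Claim_equal_read_consecutive_numbers_from_index := by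
  intro text start_index _
  unfold Spec_read_consecutive_numbers_from_index
  unfold read_consecutive_numbers_from_index read_consecutive_numbers_from_index_alt
  by_cases hg : start_index < 0 ∨ start_index ≥ (text.toList.length : Int)
  · rw [if_pos hg, if_pos hg]
  · have h0 : 0 ≤ start_index := le_of_not_gt (fun h => hg (Or.inl h))
    have h1 : start_index < (text.toList.length : Int) := lt_of_not_ge (fun h => hg (Or.inr h))
    rw [if_neg hg, if_neg hg]
    rw [pvA_eq_target text.toList start_index h0 h1]
    rw [pvRuns_sel text.toList start_index h0 h1 text.toList 0 none [] le_rfl (by omega)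
      (by simp) (by simp) (by intro h; omega)]
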